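-- pv_equiv track=rewrite | github.com/richardodliu/OpenRLHF | tex/check_literature_index.py | _parse_inline_code_spans
-- ===== SOURCE A (Python) =====
-- def _parse_inline_code_spans(text: str) -> list[tuple[int, str]]:
--     """Return (start_line, content) for each single-backtick inline code span."""
--     spans: list[tuple[int, str]] = []
--     in_code = False
--     buf: list[str] = []
--     line = 1
--     start_line: int | None = None
--
--     for ch in text:
--         if ch == "\n":
--             line += 1
--         if ch == "`":
--             if in_code:
--                 spans.append((start_line or line, "".join(buf)))
--                 buf.clear()
--                 in_code = False
--                 start_line = None
--             else:
--                 in_code = True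
--                 start_line = line
--                 buf.clear()
--             continue
--         if in_code:
--             buf.append(ch)
--
--     # If the file has an unmatched backtick, treat it as a failure signal.
--     if in_code:
--         spans.append((start_line or line, "<UNTERMINATED CODE SPAN>"))
--
--     return spans
-- ===== SOURCE B (Python) =====
-- def _parse_inline_code_spans(text: str) -> list[tuple[int, str]]:
--     """Return (start_line, content) for each single-backtick inline code span.
--
--     Split on "`" once: the parts alternate outside-text / span-content, so walk
--     them two at a time, advancing the line number by each part's newline count;
--     a span part that is the final part comes from an unmatched backtick."""
--     parts = text.split("`")
--     spans: list[tuple[int, str]] = []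
--     line = 1
--     i = 0
--     while i + 1 < len(parts):
--         line += parts[i].count("\n")
--         if i + 2 == len(parts):
--             spans.append((line, "<UNTERMINATED CODE SPAN>"))
--         else:
--             spans.append((line, parts[i + 1]))
--             line += parts[i + 1].count("\n")
--         i += 2
--     return spans
-- ===== Notes on version B (the rewrite author's own statement) =====
-- stated objective: faster
-- what changed: Replaces the per-character in_code/buf/start_line state machine with a single split on the backtick character followed by a pairwise walk over the parts (outside-text, span-content), advancing the line number by each part's newline count.
import Mathlib
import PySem

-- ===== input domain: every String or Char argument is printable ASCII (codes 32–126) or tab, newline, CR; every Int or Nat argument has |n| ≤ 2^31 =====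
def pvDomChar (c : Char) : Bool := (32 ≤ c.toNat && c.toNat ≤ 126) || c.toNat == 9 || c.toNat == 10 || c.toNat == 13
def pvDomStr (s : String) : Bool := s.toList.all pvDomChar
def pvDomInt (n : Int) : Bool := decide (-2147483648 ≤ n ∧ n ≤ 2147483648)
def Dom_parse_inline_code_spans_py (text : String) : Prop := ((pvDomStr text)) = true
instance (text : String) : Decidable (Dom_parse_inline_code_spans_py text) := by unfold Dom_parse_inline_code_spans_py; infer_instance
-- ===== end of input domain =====

-- B replaces A's per-character state machine by one split on the backtick plus a pairwise
-- walk over the parts; same results, bulk split/count work instead of a per-character loop.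

-- ===== PORT A =====
-- one loop iteration of A: state = (spans, in_code, buf, line, start_line)
def pvAStep (st : List (Int × String) × Bool × List Char × Int × Option Int) (ch : Char) :
    List (Int × String) × Bool × List Char × Int × Option Int :=
  let (spans, in_code, buf, line, start_line) := st
  let line := if ch = '\n' then line + 1 else line
  if ch = '`' then
    if in_code then
      -- Python's 'start_line or line': start_line is None or a line number ≥ 1 (never 0),
      -- so the truthiness test is exactly Option.getD
      (spans ++ [(start_line.getD line, String.mk buf)], false, [], line, none)
    else
      (spans, true, [], line, some line)
  else if in_code then
    (spans, true, buf ++ [ch], line, start_line)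
  else
    (spans, in_code, buf, line, start_line)

def parse_inline_code_spans_py (text : String) : List (Int × String) :=
  let st := text.toList.foldl pvAStep ([], false, [], 1, none)
  let (spans, in_code, _buf, line, start_line) := st
  if in_code then spans ++ [(start_line.getD line, "<UNTERMINATED CODE SPAN>")] else spans

-- ===== PORT B =====
-- the while loop of Source B: consumes parts two at a time (outside text, span content)
def pvBGo : List (List Char) → Int → List (Int × String)
  | p :: q :: rest, line =>
      let line := line + (PySem.Chars.count p ['\n'] : Int)
      if rest = [] then
        [(line, "<UNTERMINATED CODE SPAN>")]
      else
        (line, String.mk q) :: pvBGo rest (line + (PySem.Chars.count q ['\n'] : Int))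
  | _, _ => []

def parse_inline_code_spans_py_alt (text : String) : List (Int × String) :=
  pvBGo (PySem.Chars.splitOn text.toList ['`']) 1

-- ===== PRECONDITION & SPEC =====
def Spec_parse_inline_code_spans_py (text : String) (out : List (Int × String)) : Prop := out = parse_inline_code_spans_py_alt text
instance (text : String) (out : List (Int × String)) : Decidable (Spec_parse_inline_code_spans_py text out) := by unfold Spec_parse_inline_code_spans_py; infer_instance

-- ===== CLAIM (what is proved, stated in full; the proofs are below) =====
def Claim_equal_parse_inline_code_spans_py : Prop := ∀ (text : String), Dom_parse_inline_code_spans_py text → Spec_parse_inline_code_spans_py text (parse_inline_code_spans_py text)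

-- ===== LEMMAS AND PROOFS =====

-- reference semantics: the two modes of the scan, by structural recursion on the characters
mutual
def pvOutside : List Char → Int → List (Int × String)
  | [], _ => []
  | c :: r, line =>
      if c = '`' then pvInside r line line []
      else pvOutside r (if c = '\n' then line + 1 else line)
def pvInside : List Char → Int → Int → List Char → List (Int × String)
  | [], s, _, _ => [(s, "<UNTERMINATED CODE SPAN>")]
  | c :: r, s, line, buf =>
      if c = '`' then (s, String.mk buf) :: pvOutside r line
      else pvInside r s (if c = '\n' then line + 1 else line) (buf ++ [c])
end

-- accumulator form of single-character splitting (what splitOn computes for sep = ['`'])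
def pvSplitAux (c : Char) : List Char → List Char → List (List Char)
  | [], cur => [cur.reverse]
  | x :: r, cur => if x = c then cur.reverse :: pvSplitAux c r [] else pvSplitAux c r (x :: cur)

lemma pvSplitAux_ne_nil (c : Char) (l cur : List Char) : pvSplitAux c l cur ≠ [] := by
  cases l with
  | nil => simp [pvSplitAux]
  | cons x r => by_cases h : x = c <;> simp [pvSplitAux, h] <;> exact pvSplitAux_ne_nil c r _

lemma count_go_single (c : Char) : ∀ (fuel : Nat) (l : List Char) (acc : Nat),
    l.length ≤ fuel → PySem.Chars.count.go [c] fuel l acc = acc + l.count c := by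
  intro fuel
  induction fuel with
  | zero => intro l acc h; rw [List.length_eq_zero_iff.mp (Nat.le_zero.mp h)]; simp [PySem.Chars.count.go]
  | succ f ih =>
    intro l acc h
    cases l with
    | nil => simp [PySem.Chars.count.go]
    | cons x r =>
      simp only [List.length_cons, Nat.succ_le_succ_iff] at h
      by_cases hx : x = c
      · subst hx
        simp only [PySem.Chars.count.go, List.isPrefixOf, beq_self_eq_true, Bool.true_and,
          if_true, List.length_cons, List.length_nil, Nat.zero_add, List.drop_succ_cons, List.drop_zero]
        rw [ih r (acc + 1) h]
        simp [List.count_cons]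
        omega
      · have hpre : List.isPrefixOf [c] (x :: r) = false := by
          simp [List.isPrefixOf]; exact fun h' => absurd h'.symm hx
        simp only [PySem.Chars.count.go, hpre, if_neg Bool.false_ne_true]
        rw [ih r acc h]
        simp [List.count_cons, hx]
  termination_by fuel => fuel

lemma count_single (c : Char) (l : List Char) : PySem.Chars.count l [c] = l.count c := by
  simp only [PySem.Chars.count, List.isEmpty_cons, if_neg Bool.false_ne_true]
  simpa using count_go_single c l.length l 0 le_rfl

lemma splitOn_go_single (c : Char) : ∀ (fuel : Nat) (l cur acc : List Char) (accs : List (List Char)),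
    l.length ≤ fuel →
    PySem.Chars.splitOn.go [c] fuel l cur accs = accs.reverse ++ pvSplitAux c l cur := by
  intro fuel
  induction fuel with
  | zero =>
    intro l cur acc accs h
    rw [List.length_eq_zero_iff.mp (Nat.le_zero.mp h)]
    simp [PySem.Chars.splitOn.go, pvSplitAux]
  | succ f ih =>
    intro l cur acc accs h
    cases l with
    | nil => simp [PySem.Chars.splitOn.go, pvSplitAux]
    | cons x r =>
      simp only [List.length_cons, Nat.succ_le_succ_iff] at h
      by_cases hx : x = c
      · subst hx
        have hpre : List.isPrefixOf [x] (x :: r) = true := by simp [List.isPrefixOf]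
        simp only [PySem.Chars.splitOn.go, hpre, if_true, List.length_cons, List.length_nil,
          Nat.zero_add, List.drop_succ_cons, List.drop_zero]
        rw [ih r [] acc (cur.reverse :: accs) h]
        simp [pvSplitAux]
      · have hpre : List.isPrefixOf [c] (x :: r) = false := by
          simp [List.isPrefixOf]; exact fun h' => absurd h'.symm hx
        simp only [PySem.Chars.splitOn.go, hpre, if_neg Bool.false_ne_true]
        rw [ih r (x :: cur) acc accs h]
        simp [pvSplitAux, hx]
  termination_by fuel => fuel

lemma splitOn_single (c : Char) (l : List Char) :
    PySem.Chars.splitOn l [c] = pvSplitAux c l [] := by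
  simp only [PySem.Chars.splitOn]
  have := splitOn_go_single c (l.length + 1) l [] [] [] (Nat.le_succ _)
  simpa using this

-- B's walk over the split parts computes the reference semantics
lemma pvB_spec : ∀ (l : List Char),
    (∀ (line : Int) (cur : List Char),
      pvBGo (pvSplitAux '`' l cur) line = pvOutside l (line + (cur.count '\n' : Int)))
    ∧ (∀ (s : Int) (cur : List Char),
      (match pvSplitAux '`' l cur with
       | [] => ([] : List (Int × String))
       | [_] => [(s, "<UNTERMINATED CODE SPAN>")]
       | h :: t => (s, String.mk h) :: pvBGo t (s + (PySem.Chars.count h ['\n'] : Int)))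
        = pvInside l s (s + (cur.count '\n' : Int)) cur.reverse) := by
  intro l
  induction l with
  | nil =>
    constructor
    · intro line cur; simp [pvSplitAux, pvBGo, pvOutside]
    · intro s cur; simp [pvSplitAux, pvInside]
  | cons x r ih =>
    have hne := pvSplitAux_ne_nil '`' r []
    constructor
    · intro line cur
      by_cases hx : x = '`'
      · subst hx
        have key := (ih).2 (line + (cur.count '\n' : Int)) []
        simp only [List.count_nil, Int.natCast_zero, add_zero, List.reverse_nil] at key
        have hL : pvOutside ('`' :: r) (line + (cur.count '\n' : Int))
            = pvInside r (line + (cur.count '\n' : Int)) (line + (cur.count '\n' : Int)) [] := by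
          simp [pvOutside]
        rw [hL, ← key]
        simp only [pvSplitAux, if_pos rfl]
        cases hsp : pvSplitAux '`' r [] with
        | nil => exact absurd hsp hne
        | cons h t =>
          cases t <;> simp [pvBGo, count_single, List.count_reverse]
      · simp only [pvSplitAux, if_neg hx]
        rw [(ih).1 line (x :: cur)]
        have hO : pvOutside (x :: r) (line + (cur.count '\n' : Int))
            = pvOutside r (if x = '\n' then line + (cur.count '\n' : Int) + 1
                           else line + (cur.count '\n' : Int)) := by
          simp [pvOutside, hx]
        rw [hO]
        by_cases hn : x = '\n' <;> simp [hn, List.count_cons] <;> push_cast <;> ring_nf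
    · intro s cur
      by_cases hx : x = '`'
      · subst hx
        have key := (ih).1 (s + (cur.count '\n' : Int)) []
        simp only [List.count_nil, Int.natCast_zero, add_zero] at key
        have hI : pvInside ('`' :: r) s (s + (cur.count '\n' : Int)) cur.reverse
            = (s, String.mk cur.reverse) :: pvOutside r (s + (cur.count '\n' : Int)) := by
          simp [pvInside]
        rw [hI, ← key]
        simp only [pvSplitAux, if_pos rfl]
        cases hsp : pvSplitAux '`' r [] with
        | nil => exact absurd hsp hne
        | cons h t =>
          simp [pvBGo, count_single, List.count_reverse]
      · simp only [pvSplitAux, if_neg hx]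
        have key := (ih).2 s (x :: cur)
        simp only [pvSplitAux] at key
        rw [key]
        have hI : pvInside (x :: r) s (s + (cur.count '\n' : Int)) cur.reverse
            = pvInside r s (if x = '\n' then s + (cur.count '\n' : Int) + 1
                            else s + (cur.count '\n' : Int)) (cur.reverse ++ [x]) := by
          simp [pvInside, hx]
        rw [hI]
        by_cases hn : x = '\n' <;> simp [hn, List.count_cons] <;> push_cast <;> ring_nf

-- A's fold computes the reference semantics (the final unterminated-span fix-up included)
def pvAFinish (st : List (Int × String) × Bool × List Char × Int × Option Int) : List (Int × String) :=
  let (spans, in_code, _buf, line, start_line) := st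
  if in_code then spans ++ [(start_line.getD line, "<UNTERMINATED CODE SPAN>")] else spans

lemma pvA_spec : ∀ (l : List Char),
    (∀ (spans : List (Int × String)) (buf : List Char) (line : Int),
      pvAFinish (l.foldl pvAStep (spans, false, buf, line, none)) = spans ++ pvOutside l line)
    ∧ (∀ (spans : List (Int × String)) (buf : List Char) (s line : Int),
      pvAFinish (l.foldl pvAStep (spans, true, buf, line, some s)) = spans ++ pvInside l s line buf) := by
  intro l
  induction l with
  | nil =>
    constructor
    · intro spans buf line; simp [pvAFinish, pvOutside]
    · intro spans buf s line; simp [pvAFinish, pvInside]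
  | cons c r ih =>
    constructor
    · intro spans buf line
      by_cases hb : c = '`'
      · subst hb
        have hstep : pvAStep (spans, false, buf, line, none) '`'
            = (spans, true, [], line, some line) := by simp [pvAStep]
        rw [List.foldl_cons, hstep, (ih).2 spans [] line line]
        simp [pvOutside]
      · have hstep : pvAStep (spans, false, buf, line, none) c
            = (spans, false, buf, if c = '\n' then line + 1 else line, none) := by
          simp [pvAStep, hb]
        rw [List.foldl_cons, hstep, (ih).1 spans buf _]
        simp [pvOutside, hb]
    · intro spans buf s line
      by_cases hb : c = '`'
      · subst hb
        have hstep : pvAStep (spans, true, buf, line, some s) '`'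
            = (spans ++ [(s, String.mk buf)], false, [], line, none) := by simp [pvAStep]
        rw [List.foldl_cons, hstep, (ih).1 (spans ++ [(s, String.mk buf)]) [] line]
        simp [pvInside]
      · have hstep : pvAStep (spans, true, buf, line, some s) c
            = (spans, true, buf ++ [c], if c = '\n' then line + 1 else line, some s) := by
          simp [pvAStep, hb]
        rw [List.foldl_cons, hstep, (ih).2 spans (buf ++ [c]) s _]
        simp [pvInside, hb]

-- ===== VERDICT (by name: the statement is the Claim_ definition above) =====
theorem parse_inline_code_spans_py_spec : Claim_equal_parse_inline_code_spans_py := by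
  intro text _
  unfold Spec_parse_inline_code_spans_py parse_inline_code_spans_py parse_inline_code_spans_py_alt
  have hA := (pvA_spec text.toList).1 [] [] 1
  have hB := (pvB_spec text.toList).1 1 []
  rw [splitOn_single]
  simp only [List.count_nil, Int.natCast_zero, add_zero] at hB
  rw [hB]
  simpa [pvAFinish] using hA
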